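-- pv_equiv track=rewrite | github.com/mauryada/CSE231 | proj06.py | race_difference
-- ===== SOURCE A (Python) =====
-- def race_difference(L):
--     """This funtion takes a list of tupple with race, gender and victim details
--     and them counts the attacks on white people by minority people, minority
--     by white people and female on male and male on female   """
--
--     minority_on_white=0#initiatlizes minority on white crime count
--     white_on_minority=0#initiatlizes white on  minority crime count
--     female_on_male=0#initiatlizes female on male crime count
--     male_on_female=0#initiatlizes male on female crime count
--     N=0    #total case considered count
--     for item in L:#loop till the end of list
--         if 'not available' in item or '' in item:\
--         #if the data field is empty or not available
--             continue#does not execute the rest of the loop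
--         else:#if the data is available
--             N+=1#increments the total case considered count
--             if ('black' in item[0] or 'hispanic' in item[0]) and 'white' in \
-- item[2]:
--                 minority_on_white+=1#increment for minority on white crime case
--
--             if ('black' in item[2] or 'hispanic' in item[2]) and 'white' in\
-- item[0]:
--                 white_on_minority+=1#increments white on minority crime case
--
--             if 'female' in item[1] and ' male' in item[2]:
--                 female_on_male+=1#increments the female on male crime case
--
--             if 'male' == item[1] and 'female' in item[2]:
--                 male_on_female+=1#increments male on female crime case
--     return N,minority_on_white,male_on_female,female_on_male,white_on_minority
-- ===== SOURCE B (Python) =====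
-- def race_difference(L):
--     # Group rows by their 5-bit classification signature (valid?, and the four
--     # crime predicates), counting multiplicities in a dict, then combine the
--     # at-most-32 groups into the five tallies.
--     hist = {}
--     for item in L:
--         sig = (not ('not available' in item or '' in item),
--                ('black' in item[0] or 'hispanic' in item[0]) and 'white' in item[2],
--                ('black' in item[2] or 'hispanic' in item[2]) and 'white' in item[0],
--                'female' in item[1] and ' male' in item[2],
--                'male' == item[1] and 'female' in item[2])
--         hist[sig] = hist.get(sig, 0) + 1
--     N = mow = wom = fom = mof = 0
--     for (v, a, b, c, d), k in hist.items():
--         if v: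
--             N += k
--             if a: mow += k
--             if b: wom += k
--             if c: fom += k
--             if d: mof += k
--     return N, mow, mof, fom, wom
-- ===== Notes on version B (the rewrite author's own statement) =====
-- stated objective: alternative
-- what changed: Instead of threading five counters through one loop, B buckets each row into one of at most 32 boolean classification signatures via a dict histogram, then derives all five tallies by combining the per-signature counts in a second phase over the histogram.
import Mathlib
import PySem

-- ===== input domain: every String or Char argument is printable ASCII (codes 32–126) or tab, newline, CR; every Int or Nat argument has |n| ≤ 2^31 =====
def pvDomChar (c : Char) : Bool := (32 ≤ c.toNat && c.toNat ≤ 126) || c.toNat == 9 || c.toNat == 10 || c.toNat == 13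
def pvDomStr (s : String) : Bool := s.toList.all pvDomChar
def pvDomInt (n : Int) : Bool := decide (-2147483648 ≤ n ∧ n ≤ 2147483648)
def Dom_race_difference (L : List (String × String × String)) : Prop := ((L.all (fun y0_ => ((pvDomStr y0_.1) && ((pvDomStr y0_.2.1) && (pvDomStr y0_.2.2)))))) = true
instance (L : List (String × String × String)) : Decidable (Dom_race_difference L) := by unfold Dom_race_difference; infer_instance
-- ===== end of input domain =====

-- B replaces A's five-counter single loop by a histogram keyed on each row's boolean
-- classification signature (a dict with at most 32 keys) followed by a combining pass
-- over the histogram; objective: alternative algorithm, no speed claim.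

-- ===== PORT A =====
-- A's loop body, step for step: the tuple-membership guard, then the four
-- conditional increments in A's order; state (mow, wom, fom, mof, N).
def pvStepA (st : Int × Int × Int × Int × Int) (item : String × String × String) :
    Int × Int × Int × Int × Int :=
  if item.1 == "not available" || item.2.1 == "not available" || item.2.2 == "not available" ||
     item.1 == "" || item.2.1 == "" || item.2.2 == "" then
    st
  else
    let (mow, wom, fom, mof, N) := st
    let N := N + 1
    let mow := if (PySem.Str.isIn "black" item.1 || PySem.Str.isIn "hispanic" item.1) &&
                  PySem.Str.isIn "white" item.2.2 then mow + 1 else mow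
    let wom := if (PySem.Str.isIn "black" item.2.2 || PySem.Str.isIn "hispanic" item.2.2) &&
                  PySem.Str.isIn "white" item.1 then wom + 1 else wom
    let fom := if PySem.Str.isIn "female" item.2.1 && PySem.Str.isIn " male" item.2.2 then
                  fom + 1 else fom
    let mof := if "male" == item.2.1 && PySem.Str.isIn "female" item.2.2 then mof + 1 else mof
    (mow, wom, fom, mof, N)

def race_difference (L : List (String × String × String)) : Int × Int × Int × Int × Int :=
  let st := L.foldl pvStepA (0, 0, 0, 0, 0)
  (st.2.2.2.2, st.1, st.2.2.2.1, st.2.2.1, st.2.1)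

-- ===== PORT B =====
-- the 5-bit classification signature B computes for every row
def pvSig (item : String × String × String) : Bool × Bool × Bool × Bool × Bool :=
  (!(item.1 == "not available" || item.2.1 == "not available" || item.2.2 == "not available" ||
     item.1 == "" || item.2.1 == "" || item.2.2 == ""),
   (PySem.Str.isIn "black" item.1 || PySem.Str.isIn "hispanic" item.1) &&
     PySem.Str.isIn "white" item.2.2,
   (PySem.Str.isIn "black" item.2.2 || PySem.Str.isIn "hispanic" item.2.2) &&
     PySem.Str.isIn "white" item.1,
   PySem.Str.isIn "female" item.2.1 && PySem.Str.isIn " male" item.2.2,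
   "male" == item.2.1 && PySem.Str.isIn "female" item.2.2)

-- hist[sig] = hist.get(sig, 0) + 1
def pvHistStep (d : PySem.Dict (Bool × Bool × Bool × Bool × Bool) Int)
    (item : String × String × String) : PySem.Dict (Bool × Bool × Bool × Bool × Bool) Int :=
  let s := pvSig item
  d.insert s (d.getD s 0 + 1)

-- B's second phase: combine one histogram entry into the five tallies (N, mow, wom, fom, mof)
def pvCombine (st : Int × Int × Int × Int × Int)
    (p : (Bool × Bool × Bool × Bool × Bool) × Int) : Int × Int × Int × Int × Int :=
  let (N, mow, wom, fom, mof) := st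
  let ((v, a, b, c, d), k) := p
  if v then
    (N + k, if a then mow + k else mow, if b then wom + k else wom,
     if c then fom + k else fom, if d then mof + k else mof)
  else st

def race_difference_alt (L : List (String × String × String)) : Int × Int × Int × Int × Int :=
  let hist := L.foldl pvHistStep PySem.Dict.empty
  let st := hist.items.foldl pvCombine (0, 0, 0, 0, 0)
  (st.1, st.2.1, st.2.2.2.2, st.2.2.2.1, st.2.2.1)

-- ===== PRECONDITION & SPEC =====
def Spec_race_difference (L : List (String × String × String)) (out : Int × Int × Int × Int × Int) : Prop := out = race_difference_alt L
instance (L : List (String × String × String)) (out : Int × Int × Int × Int × Int) : Decidable (Spec_race_difference L out) := by unfold Spec_race_difference; infer_instance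

-- ===== CLAIM (what is proved, stated in full; the proofs are below) =====
def Claim_equal_race_difference : Prop := ∀ (L : List (String × String × String)), Dom_race_difference L → Spec_race_difference L (race_difference L)

-- ===== LEMMAS AND PROOFS =====

-- the five predicates, as proof-side names (pvSig x = (pvP0 x, pvP1 x, pvP2 x, pvP3 x, pvP4 x))
def pvP0 (x : String × String × String) : Bool := (pvSig x).1
def pvP1 (x : String × String × String) : Bool := (pvSig x).2.1
def pvP2 (x : String × String × String) : Bool := (pvSig x).2.2.1
def pvP3 (x : String × String × String) : Bool := (pvSig x).2.2.2.1
def pvP4 (x : String × String × String) : Bool := (pvSig x).2.2.2.2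

-- weights of one histogram entry in each tally
def pvWN (p : (Bool × Bool × Bool × Bool × Bool) × Int) : Int := if p.1.1 then p.2 else 0
def pvW1 (p : (Bool × Bool × Bool × Bool × Bool) × Int) : Int := if p.1.1 && p.1.2.1 then p.2 else 0
def pvW2 (p : (Bool × Bool × Bool × Bool × Bool) × Int) : Int := if p.1.1 && p.1.2.2.1 then p.2 else 0
def pvW3 (p : (Bool × Bool × Bool × Bool × Bool) × Int) : Int := if p.1.1 && p.1.2.2.2.1 then p.2 else 0
def pvW4 (p : (Bool × Bool × Bool × Bool × Bool) × Int) : Int := if p.1.1 && p.1.2.2.2.2 then p.2 else 0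

theorem pvStepA_valid (hd : String × String × String) (h : pvP0 hd = true)
    (mow wom fom mof N : Int) :
    pvStepA (mow, wom, fom, mof, N) hd =
      (mow + (if pvP1 hd then 1 else 0), wom + (if pvP2 hd then 1 else 0),
       fom + (if pvP3 hd then 1 else 0), mof + (if pvP4 hd then 1 else 0), N + 1) := by
  have hg : (hd.1 == "not available" || hd.2.1 == "not available" ||
      hd.2.2 == "not available" || hd.1 == "" || hd.2.1 == "" || hd.2.2 == "") = false := by
    simp only [pvP0, pvSig, Bool.not_eq_true'] at h
    exact h
  simp only [pvStepA, hg, Bool.false_eq_true, if_false, pvP1, pvP2, pvP3, pvP4, pvSig]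
  split_ifs <;> simp

theorem pvStepA_invalid (hd : String × String × String) (h : pvP0 hd = false)
    (st : Int × Int × Int × Int × Int) :
    pvStepA st hd = st := by
  have hg : (hd.1 == "not available" || hd.2.1 == "not available" ||
      hd.2.2 == "not available" || hd.1 == "" || hd.2.1 == "" || hd.2.2 == "") = true := by
    simp only [pvP0, pvSig, Bool.not_eq_false'] at h
    exact h
  simp only [pvStepA, hg, if_true]

-- A's loop computes the filtered length and the four filtered counts
theorem pvLoopA_eq (L : List (String × String × String)) :
    ∀ (mow wom fom mof N : Int),
      L.foldl pvStepA (mow, wom, fom, mof, N) =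
        (mow + ((L.filter pvP0).countP pvP1 : Int),
         wom + ((L.filter pvP0).countP pvP2 : Int),
         fom + ((L.filter pvP0).countP pvP3 : Int),
         mof + ((L.filter pvP0).countP pvP4 : Int),
         N + ((L.filter pvP0).length : Int)) := by
  induction L with
  | nil => intro mow wom fom mof N; simp
  | cons hd tl ih =>
    intro mow wom fom mof N
    by_cases h : pvP0 hd = true
    · rw [List.foldl_cons, pvStepA_valid hd h, ih]
      simp only [List.filter_cons, h, if_true, List.countP_cons, List.length_cons]
      refine Prod.ext ?_ (Prod.ext ?_ (Prod.ext ?_ (Prod.ext ?_ ?_))) <;> simp <;>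
        (try split_ifs) <;> push_cast <;> ring
    · rw [List.foldl_cons, pvStepA_invalid hd (by simpa using h), ih]
      simp [h]

-- B's histogram loop is Counter over the signature list
theorem pvHist_eq (L : List (String × String × String)) :
    L.foldl pvHistStep PySem.Dict.empty = PySem.Dict.counter (L.map pvSig) := by
  rw [← PySem.Dict.foldl_insert_getD_add_one_eq_counter, List.foldl_map]
  rfl

-- one combining step adds the entry's weights
theorem pvCombine_eq (st : Int × Int × Int × Int × Int)
    (p : (Bool × Bool × Bool × Bool × Bool) × Int) :
    pvCombine st p = (st.1 + pvWN p, st.2.1 + pvW1 p, st.2.2.1 + pvW2 p,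
                      st.2.2.2.1 + pvW3 p, st.2.2.2.2 + pvW4 p) := by
  obtain ⟨N, mow, wom, fom, mof⟩ := st
  obtain ⟨⟨v, a, b, c, d⟩, k⟩ := p
  simp only [pvCombine, pvWN, pvW1, pvW2, pvW3, pvW4]
  cases v <;> simp <;> split_ifs <;> simp

-- B's combining loop sums the weights
theorem pvCombineLoop_eq (its : List ((Bool × Bool × Bool × Bool × Bool) × Int)) :
    ∀ (st : Int × Int × Int × Int × Int),
      its.foldl pvCombine st =
        (st.1 + (its.map pvWN).sum, st.2.1 + (its.map pvW1).sum, st.2.2.1 + (its.map pvW2).sum,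
         st.2.2.2.1 + (its.map pvW3).sum, st.2.2.2.2 + (its.map pvW4).sum) := by
  induction its with
  | nil => intro st; simp
  | cons p its ih =>
    intro st
    rw [List.foldl_cons, pvCombine_eq, ih]
    refine Prod.ext ?_ (Prod.ext ?_ (Prod.ext ?_ (Prod.ext ?_ ?_))) <;> simp <;> ring

-- summing an indicator over a nodup list containing x picks out x's term
theorem pvSumIndicator (l : List (Bool × Bool × Bool × Bool × Bool)) (hl : l.Nodup)
    (x : Bool × Bool × Bool × Bool × Bool) (hx : x ∈ l)
    (p : (Bool × Bool × Bool × Bool × Bool) → Bool) :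
    (l.map (fun k => if p k then (if k == x then (1 : Int) else 0) else 0)).sum =
      if p x then (1 : Int) else 0 := by
  induction l with
  | nil => cases hx
  | cons h t ih =>
    rw [List.nodup_cons] at hl
    rcases List.mem_cons.mp hx with rfl | hxt
    · have htz : (t.map (fun k => if p k then (if k == x then (1 : Int) else 0) else 0)).sum = 0 := by
        apply List.sum_eq_zero
        intro y hy
        rcases List.mem_map.mp hy with ⟨k, hk, rfl⟩
        have hkx : k ≠ x := fun e => hl.1 (e ▸ hk)
        simp [beq_iff_eq, hkx]
      rw [List.map_cons, List.sum_cons, htz]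
      simp
    · have hne : h ≠ x := fun e => hl.1 (e ▸ hxt)
      rw [List.map_cons, List.sum_cons, ih hl.2 hxt]
      simp [beq_iff_eq, hne]

-- weighted sum of counts over any nodup list covering xs equals countP
theorem pvSumCount (l : List (Bool × Bool × Bool × Bool × Bool)) (hl : l.Nodup)
    (xs : List (Bool × Bool × Bool × Bool × Bool)) (hmem : ∀ y ∈ xs, y ∈ l)
    (p : (Bool × Bool × Bool × Bool × Bool) → Bool) :
    (l.map (fun k => if p k then (xs.count k : Int) else 0)).sum = (xs.countP p : Int) := by
  induction xs with
  | nil =>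
    simp only [List.count_nil, List.countP_nil, Int.natCast_zero]
    apply List.sum_eq_zero
    intro y hy
    rcases List.mem_map.mp hy with ⟨k, _, rfl⟩
    split_ifs <;> rfl
  | cons x xs ih =>
    have hx : x ∈ l := hmem x List.mem_cons_self
    have hmem' : ∀ y ∈ xs, y ∈ l := fun y hy => hmem y (List.mem_cons_of_mem _ hy)
    have hsplit : (l.map (fun k => if p k then ((x :: xs).count k : Int) else 0)) =
        (l.map (fun k => (if p k then (xs.count k : Int) else 0) +
          (if p k then (if k == x then (1 : Int) else 0) else 0))) := by
      apply List.map_congr_left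
      intro k _
      rw [List.count_cons]
      simp only [beq_iff_eq]
      split_ifs <;> push_cast <;> try ring
      all_goals (exfalso; rename_i h1 h2; first | exact h2 h1.symm | exact h1 h2.symm)
    rw [hsplit, PySem.List.sum_map_add_int, ih hmem', pvSumIndicator l hl x hx p,
        List.countP_cons]
    split_ifs <;> push_cast <;> ring

-- one tally of B: the weighted sum over the histogram equals a countP over L
theorem pvTally_eq (L : List (String × String × String))
    (w : (Bool × Bool × Bool × Bool × Bool) × Int → Int)
    (p : (Bool × Bool × Bool × Bool × Bool) → Bool)
    (hw : ∀ q, w q = if p q.1 then q.2 else 0) :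
    (((PySem.Dict.counter (L.map pvSig)).items).map w).sum =
      (L.countP (fun x => p (pvSig x)) : Int) := by
  rw [PySem.Dict.items_counter, List.map_map]
  have : (w ∘ fun k => (k, ((L.map pvSig).count k : Int))) =
      fun k => if p k then ((L.map pvSig).count k : Int) else 0 := by
    funext k; rw [Function.comp_apply, hw]
  rw [this, pvSumCount _ (PySem.Set.nodup_ofList _) _ (fun y hy => (PySem.Set.mem_ofList _ _).mpr hy) p,
      List.countP_map]
  rfl

-- ===== VERDICT (by name: the statement is the Claim_ definition above) =====
theorem race_difference_spec : Claim_equal_race_difference := by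
  intro L _
  simp only [Spec_race_difference, race_difference, race_difference_alt]
  rw [pvLoopA_eq, pvHist_eq, pvCombineLoop_eq]
  rw [pvTally_eq L pvWN (fun k => k.1) (fun q => rfl),
      pvTally_eq L pvW1 (fun k => k.1 && k.2.1) (fun q => rfl),
      pvTally_eq L pvW2 (fun k => k.1 && k.2.2.1) (fun q => rfl),
      pvTally_eq L pvW3 (fun k => k.1 && k.2.2.2.1) (fun q => rfl),
      pvTally_eq L pvW4 (fun k => k.1 && k.2.2.2.2) (fun q => rfl)]
  have hN : L.countP (fun x => (pvSig x).1) = (L.filter pvP0).length := by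
    rw [List.countP_eq_length_filter]; rfl
  have h1 : L.countP (fun x => (pvSig x).1 && (pvSig x).2.1) = (L.filter pvP0).countP pvP1 := by
    rw [List.countP_filter]
    exact List.countP_congr (fun x _ => by simp [pvP0, pvP1, Bool.and_comm])
  have h2 : L.countP (fun x => (pvSig x).1 && (pvSig x).2.2.1) = (L.filter pvP0).countP pvP2 := by
    rw [List.countP_filter]
    exact List.countP_congr (fun x _ => by simp [pvP0, pvP2, Bool.and_comm])
  have h3 : L.countP (fun x => (pvSig x).1 && (pvSig x).2.2.2.1) = (L.filter pvP0).countP pvP3 := by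
    rw [List.countP_filter]
    exact List.countP_congr (fun x _ => by simp [pvP0, pvP3, Bool.and_comm])
  have h4 : L.countP (fun x => (pvSig x).1 && (pvSig x).2.2.2.2) = (L.filter pvP0).countP pvP4 := by
    rw [List.countP_filter]
    exact List.countP_congr (fun x _ => by simp [pvP0, pvP4, Bool.and_comm])
  simp [hN, h1, h2, h3, h4]
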